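-- pv_equiv track=rewrite | github.com/kevinwindisch/First-Year-Projects | sat_solver.py | assignments_to_sudoku_board
-- ===== SOURCE A (Python) =====
-- def assignments_to_sudoku_board(assignments, n):
--     """
--     Given a variable assignment as given by satisfying_assignment, as well as a
--     size n, construct an n-by-n 2-d array (list-of-lists) representing the
--     solution given by the provided assignment of variables.
--
--     If the given assignments correspond to an unsolvable board, return None
--     instead.
--     """
--     if assignments is None:
--         return None
--
--     keys = sorted(assignments.keys())
--     grid = []
--     new_row = []
--     for coordinate in keys:
--         if assignments[coordinate]:
--             new_row.append(coordinate[2])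
--             if len(new_row) == n:
--                 grid.append(new_row)
--                 new_row = []
--
--     return grid
-- ===== SOURCE B (Python) =====
-- def assignments_to_sudoku_board(assignments, n):
--     if assignments is None:
--         return None
--     # extract the digits of all true variables first, then chunk into rows
--     trues = [c[2] for c in sorted(assignments) if assignments[c]]
--     if n <= 0:
--         return []
--     grid = []
--     while len(trues) >= n:
--         grid.append(trues[:n])
--         trues = trues[n:]
--     return grid
-- ===== Notes on version B (the rewrite author's own statement) =====
-- stated objective: simpler
-- what changed: A interleaves filtering and row construction in one loop with a mutable partial-row accumulator; B first extracts the flat list of digits of all true coordinates and then chunks it into complete rows of n by slicing, with an explicit n <= 0 guard returning [].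
import Mathlib
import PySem

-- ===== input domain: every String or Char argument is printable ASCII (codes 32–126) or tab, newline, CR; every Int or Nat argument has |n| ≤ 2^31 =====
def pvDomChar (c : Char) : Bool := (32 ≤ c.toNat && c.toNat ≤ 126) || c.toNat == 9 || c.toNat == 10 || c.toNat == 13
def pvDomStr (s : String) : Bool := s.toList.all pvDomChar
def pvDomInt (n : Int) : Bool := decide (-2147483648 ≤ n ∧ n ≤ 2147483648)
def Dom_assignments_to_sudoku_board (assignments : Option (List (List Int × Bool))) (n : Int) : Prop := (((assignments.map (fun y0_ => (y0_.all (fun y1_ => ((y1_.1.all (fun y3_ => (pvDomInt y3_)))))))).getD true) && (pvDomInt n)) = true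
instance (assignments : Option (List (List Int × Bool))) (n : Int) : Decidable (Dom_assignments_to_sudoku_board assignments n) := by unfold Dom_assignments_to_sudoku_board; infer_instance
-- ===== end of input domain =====

-- B separates the two concerns A interleaves: B first extracts the digit list of all true
-- variables, then chunks it into complete rows by slicing; objective: simpler (not faster).

-- ===== PORT A =====
-- dict lookup assignments[coordinate] (keys always come from the dict itself, so it never misses)
def pvLookup (l : List (List Int × Bool)) (k : List Int) : Bool :=
  match l.find? (fun p => p.1 == k) with
  | some p => p.2
  | none => false

-- A's loop body for one true coordinate: append the digit, close the row when it reaches n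
def pvStepA (n : Int) (st : List (List Int) × List Int) (x : Int) : List (List Int) × List Int :=
  let nr := st.2 ++ [x]
  if (nr.length : Int) = n then (st.1 ++ [nr], []) else (st.1, nr)

def assignments_to_sudoku_board (assignments : Option (List (List Int × Bool))) (n : Int) : Option (List (List Int)) :=
  match assignments with
  | none => none
  | some l =>
    let keys := PySem.List.sorted (l.map Prod.fst) (fun x => x) false
    let st := keys.foldl (fun st c =>
        if pvLookup l c then pvStepA n st (PySem.List.pyGetD c 2 0) else st) ([], [])
    some st.1

-- ===== PORT B =====
-- B's while loop: split off complete rows of n from the front (0 < n is the loop's context)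
def pvChunk (n : Nat) (ts : List Int) : List (List Int) :=
  if _h : 0 < n ∧ n ≤ ts.length then ts.take n :: pvChunk n (ts.drop n) else []
termination_by ts.length
decreasing_by simp [List.length_drop]; omega

def assignments_to_sudoku_board_alt (assignments : Option (List (List Int × Bool))) (n : Int) : Option (List (List Int)) :=
  match assignments with
  | none => none
  | some l =>
    let keys := PySem.List.sorted (l.map Prod.fst) (fun x => x) false
    let trues := (keys.filter (fun c => pvLookup l c)).map (fun c => PySem.List.pyGetD c 2 0)
    if n ≤ 0 then some []
    else some (pvChunk n.toNat trues)

-- ===== PRECONDITION & SPEC =====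
-- Pre_ excludes exactly the inputs where Python A raises IndexError: a coordinate mapped to
-- True that has fewer than 3 components (A reads coordinate[2] for every true coordinate).
def Pre_assignments_to_sudoku_board (assignments : Option (List (List Int × Bool))) (n : Int) : Prop :=
  (assignments.getD []).all (fun p => !p.2 || decide (3 ≤ p.1.length)) = true
instance (assignments : Option (List (List Int × Bool))) (n : Int) : Decidable (Pre_assignments_to_sudoku_board assignments n) := by unfold Pre_assignments_to_sudoku_board; infer_instance

def pvWitness_assignments_to_sudoku_board : (Option (List (List Int × Bool))) × Int :=
  (some [([1,1,5], true), ([0,2,3], false), ([0,1,7], true), ([0,0,9], true), ([1,0,4], true)], 2)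

def Spec_assignments_to_sudoku_board (assignments : Option (List (List Int × Bool))) (n : Int) (out : Option (List (List Int))) : Prop := out = assignments_to_sudoku_board_alt assignments n
instance (assignments : Option (List (List Int × Bool))) (n : Int) (out : Option (List (List Int))) : Decidable (Spec_assignments_to_sudoku_board assignments n out) := by unfold Spec_assignments_to_sudoku_board; infer_instance

-- ===== CLAIM (what is proved, stated in full; the proofs are below) =====
def Claim_equal_assignments_to_sudoku_board : Prop := ∀ (assignments : Option (List (List Int × Bool))) (n : Int), Dom_assignments_to_sudoku_board assignments n → Pre_assignments_to_sudoku_board assignments n → Spec_assignments_to_sudoku_board assignments n (assignments_to_sudoku_board assignments n)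

-- ===== LEMMAS AND PROOFS =====

-- with n ≤ 0 a row never reaches length n, so A's grid stays empty
theorem pv_fold_nonpos (n : Int) (hn : n ≤ 0) :
    ∀ (ts : List Int) (g : List (List Int)) (r : List Int),
      (ts.foldl (pvStepA n) (g, r)).1 = g := by
  intro ts
  induction ts with
  | nil => intro g r; rfl
  | cons x ts ih =>
    intro g r
    have hne : ¬ (((r ++ [x]).length : Int) = n) := by
      simp only [List.length_append, List.length_cons]; push_cast; omega
    simp only [List.foldl_cons, pvStepA, hne, if_false]
    exact ih g (r ++ [x])

-- with 0 < n, A's fold starting from a partial row r is g ++ the chunking of r ++ ts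
theorem pv_fold_pos (n : Int) (hn : 0 < n) :
    ∀ (ts : List Int) (g : List (List Int)) (r : List Int), r.length < n.toNat →
      (ts.foldl (pvStepA n) (g, r)).1 = g ++ pvChunk n.toNat (r ++ ts) := by
  intro ts
  induction ts with
  | nil =>
    intro g r hr
    rw [pvChunk]
    simp only [List.append_nil]
    rw [dif_neg (by omega)]
    simp
  | cons x ts ih =>
    intro g r hr
    have hra : (r ++ [x]).length = r.length + 1 := by simp
    by_cases hfull : (((r ++ [x]).length : Int) = n)
    · have hlen : (r ++ [x]).length = n.toNat := by omega
      simp only [List.foldl_cons, pvStepA, hfull, if_true]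
      rw [ih (g ++ [r ++ [x]]) [] (by simp; omega)]
      conv_rhs => rw [show r ++ x :: ts = (r ++ [x]) ++ ts by simp, pvChunk]
      rw [dif_pos ⟨by omega, by rw [List.length_append, hlen]; omega⟩]
      rw [List.take_left' hlen, List.drop_left' hlen]
      simp
    · have hlt : (r ++ [x]).length < n.toNat := by omega
      simp only [List.foldl_cons, pvStepA, hfull, if_false]
      rw [ih g (r ++ [x]) hlt]
      simp

-- ===== VERDICT (by name: the statement is the Claim_ definition above) =====
theorem assignments_to_sudoku_board_spec : Claim_equal_assignments_to_sudoku_board := by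
  intro assignments n _ _
  unfold Spec_assignments_to_sudoku_board
  cases assignments with
  | none => rfl
  | some l =>
    simp only [assignments_to_sudoku_board, assignments_to_sudoku_board_alt]
    rw [show (PySem.List.sorted (l.map Prod.fst) (fun x => x) false).foldl
          (fun st c => if pvLookup l c then pvStepA n st (PySem.List.pyGetD c 2 0) else st)
          (([] : List (List Int)), ([] : List Int))
        = (((PySem.List.sorted (l.map Prod.fst) (fun x => x) false).filter
              (fun c => pvLookup l c)).map (fun c => PySem.List.pyGetD c 2 0)).foldl
            (pvStepA n) ([], []) from by
      rw [List.foldl_map, List.foldl_filter]]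
    by_cases hn : n ≤ 0
    · rw [if_pos hn, pv_fold_nonpos n hn]
    · rw [if_neg hn, pv_fold_pos n (by omega) _ [] [] (by simp; omega)]
      simp
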